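-- pv_equiv track=rewrite | github.com/Pauc09/pauc09 | Graficas (1).py | cyk_algorithm
-- ===== SOURCE A (Python) =====
-- def cyk_algorithm(grammar, input_string):
--     n = len(input_string)
--     table = [[set() for _ in range(n)] for _ in range(n)]
--
--     for i in range(n):
--         for lhs, rhs in grammar.items():
--             for production in rhs:
--                 if len(production) == 1 and production[0] == input_string[i]:
--                     table[i][i].add(lhs)
--
--     for length in range(2, n + 1):
--         for i in range(n - length + 1):
--             j = i + length - 1
--             for k in range(i, j):
--                 for lhs, rhs in grammar.items():
--                     for production in rhs:
--                         if len(production) == 2: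
--                             B, C = production
--                             if B in table[i][k] and C in table[k + 1][j]:
--                                 table[i][j].add(lhs)
--
--     return 'S' in table[0][n - 1]
-- ===== SOURCE B (Python) =====
-- def cyk_algorithm(grammar, input_string):
--     # index the grammar once
--     unit = {}
--     for lhs, rhs in grammar.items():
--         for p in rhs:
--             if len(p) == 1:
--                 unit.setdefault(p[0], set()).add(lhs)
--     pairs = {}
--     for lhs, rhs in grammar.items():
--         for p in rhs:
--             if len(p) == 2:
--                 pairs.setdefault((p[0], p[1]), set()).add(lhs)
--
--     memo = {}
--
--     def solve(i, j):
--         # nonterminals deriving input_string[i..j]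
--         if (i, j) in memo:
--             return memo[(i, j)]
--         if i == j:
--             res = set(unit.get(input_string[i], ()))
--         else:
--             res = set()
--             for k in range(i, j):
--                 left = solve(i, k)
--                 right = solve(k + 1, j)
--                 for B in left:
--                     for C in right:
--                         res |= pairs.get((B, C), set())
--         memo[(i, j)] = res
--         return res
--
--     return 'S' in solve(0, len(input_string) - 1)
-- ===== Notes on version B (the rewrite author's own statement) =====
-- stated objective: faster
-- what changed: B replaces A's bottom-up table fill with its per-cell rescan of the whole grammar by top-down memoized recursion solve(i,j) over two hash indexes built once (terminal -> lhs set and (B,C) -> lhs set), so each span is computed from index lookups over the two subspan nonterminal sets instead of a full grammar scan per (i,j,k).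
import Mathlib
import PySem

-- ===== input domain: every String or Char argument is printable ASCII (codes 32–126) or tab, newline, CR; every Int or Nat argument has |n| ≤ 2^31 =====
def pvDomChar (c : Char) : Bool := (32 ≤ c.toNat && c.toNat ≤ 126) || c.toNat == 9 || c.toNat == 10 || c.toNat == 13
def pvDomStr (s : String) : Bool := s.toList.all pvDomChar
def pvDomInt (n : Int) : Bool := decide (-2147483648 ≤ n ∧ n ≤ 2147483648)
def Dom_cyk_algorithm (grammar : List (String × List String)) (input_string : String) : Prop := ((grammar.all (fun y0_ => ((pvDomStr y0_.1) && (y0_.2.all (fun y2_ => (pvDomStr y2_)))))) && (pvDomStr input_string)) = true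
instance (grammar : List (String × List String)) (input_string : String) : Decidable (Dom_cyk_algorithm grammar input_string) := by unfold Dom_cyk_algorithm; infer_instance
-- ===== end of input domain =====

-- B replaces A's bottom-up triple loop with grammar rescans by top-down recursion on spans
-- (memoized in Python) over two hash indexes built once (terminal -> lhs set, (B,C) -> lhs set).


-- 1-character Python string (production[0] etc. is a str of length 1)
def pvSing (c : Char) : String := String.ofList [c]

-- ===== PORT A =====
-- inner two loops of A's first phase: for each production of one lhs, add lhs to the diagonal cell
-- when the production is the single terminal ch
def pvADiagP (lhs : String) (ch : Char) (ps : List String) (cell : PySem.Set String) : PySem.Set String :=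
  ps.foldl (fun cell p =>
    match p.toList with
    | [b] => if b = ch then PySem.Set.add cell lhs else cell
    | _ => cell) cell

def pvADiag (g : List (String × List String)) (ch : Char) (cell : PySem.Set String) : PySem.Set String :=
  g.foldl (fun cell lv => pvADiagP lv.1 ch lv.2 cell) cell

-- A's inner grammar scan for one (i,j,k): u = table[i][k], v = table[k+1][j]
def pvAStepP (lhs : String) (u v : PySem.Set String) (ps : List String) (cell : PySem.Set String) : PySem.Set String :=
  ps.foldl (fun cell p =>
    match p.toList with
    | [b, c] =>
        if PySem.Set.contains u (pvSing b) && PySem.Set.contains v (pvSing c) then PySem.Set.add cell lhs else cell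
    | _ => cell) cell

def pvAStep (g : List (String × List String)) (u v : PySem.Set String) (cell : PySem.Set String) : PySem.Set String :=
  g.foldl (fun cell lv => pvAStepP lv.1 u v lv.2 cell) cell

-- phase 1: fill the diagonal (table modelled as a total function cell (a,b) ↦ set)
def pvPhase1A (g : List (String × List String)) (cs : List Char) : Nat → Nat → PySem.Set String :=
  (List.range cs.length).foldl
    (fun t i => fun a b => if a = i ∧ b = i then pvADiag g (cs.getD i ' ') (t i i) else t a b)
    (fun _ _ => PySem.Set.empty)

-- phase 2: lengths 2..n, exactly A's loop nest (the (i,j) cell is only written, never read, in its k loop)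
def pvPhase2A (g : List (String × List String)) (n : Nat) (t1 : Nat → Nat → PySem.Set String) : Nat → Nat → PySem.Set String :=
  (List.range' 2 (n - 1)).foldl
    (fun t length =>
      (List.range (n - length + 1)).foldl
        (fun t i =>
          let j := i + length - 1
          let cell := (List.range' i (length - 1)).foldl
              (fun cell k => pvAStep g (t i k) (t (k + 1) j) cell) (t i j)
          fun a b => if a = i ∧ b = j then cell else t a b)
        t)
    t1

def cyk_algorithm (grammar : List (String × List String)) (input_string : String) : Bool :=
  let g := (PySem.Dict.ofList grammar).items
  let cs := input_string.toList
  let n := cs.length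
  PySem.Set.contains (pvPhase2A g n (pvPhase1A g cs) 0 (n - 1)) "S"

-- ===== PORT B =====
-- unit.setdefault(p[0], set()).add(lhs) over one rhs list
def pvBUnitP (lhs : String) (ps : List String) (d : PySem.Dict Char (PySem.Set String)) : PySem.Dict Char (PySem.Set String) :=
  ps.foldl (fun d p =>
    match p.toList with
    | [b] => d.modify b [] (fun s => PySem.Set.add s lhs)
    | _ => d) d

def pvBuildUnit (g : List (String × List String)) : PySem.Dict Char (PySem.Set String) :=
  g.foldl (fun d lv => pvBUnitP lv.1 lv.2 d) PySem.Dict.empty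

-- pairs.setdefault((p[0], p[1]), set()).add(lhs) over one rhs list
def pvBPairP (lhs : String) (ps : List String) (d : PySem.Dict (String × String) (PySem.Set String)) : PySem.Dict (String × String) (PySem.Set String) :=
  ps.foldl (fun d p =>
    match p.toList with
    | [b, c] => d.modify (pvSing b, pvSing c) [] (fun s => PySem.Set.add s lhs)
    | _ => d) d

def pvBuildPairs (g : List (String × List String)) : PySem.Dict (String × String) (PySem.Set String) :=
  g.foldl (fun d lv => pvBPairP lv.1 lv.2 d) PySem.Dict.empty

-- 'for B in left: for C in right: res |= pairs.get((B, C), set())'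
def pvBStep (pairs : PySem.Dict (String × String) (PySem.Set String)) (u v : PySem.Set String) (cell : PySem.Set String) : PySem.Set String :=
  u.foldl (fun cell b => v.foldl (fun cell c => PySem.Set.union cell (pairs.getD (b, c) [])) cell) cell

-- B's solve(i, j): nonterminals deriving cs[i..j], top-down recursion on the span
-- (the Python memo cache is a pure performance device and does not change the value;
-- fuel makes the recursion structural — any fuel > j - i gives solve's value)
def pvSolve (unit : PySem.Dict Char (PySem.Set String)) (pairs : PySem.Dict (String × String) (PySem.Set String))
    (cs : List Char) : Nat → Nat → Nat → PySem.Set String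
  | 0, _, _ => PySem.Set.empty
  | f + 1, i, j =>
      if i = j then PySem.Set.ofList (unit.getD (cs.getD i ' ') [])
      else (List.range' i (j - i)).foldl
          (fun cell k => pvBStep pairs (pvSolve unit pairs cs f i k) (pvSolve unit pairs cs f (k + 1) j) cell)
          PySem.Set.empty

def cyk_algorithm_alt (grammar : List (String × List String)) (input_string : String) : Bool :=
  let g := (PySem.Dict.ofList grammar).items
  let cs := input_string.toList
  PySem.Set.contains (pvSolve (pvBuildUnit g) (pvBuildPairs g) cs cs.length 0 (cs.length - 1)) "S"

-- ===== PRECONDITION & SPEC =====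
-- Pre_ excludes only the empty string, on which the Python A raises IndexError (table[0][-1] of an empty table).
def Pre_cyk_algorithm (grammar : List (String × List String)) (input_string : String) : Prop := input_string ≠ ""
instance (grammar : List (String × List String)) (input_string : String) : Decidable (Pre_cyk_algorithm grammar input_string) := by unfold Pre_cyk_algorithm; infer_instance

def pvWitness_cyk_algorithm : (List (String × List String)) × String := ([("S", ["AB", "a"]), ("A", ["a"]), ("B", ["b"])], "ab")

def Spec_cyk_algorithm (grammar : List (String × List String)) (input_string : String) (out : Bool) : Prop := out = cyk_algorithm_alt grammar input_string
instance (grammar : List (String × List String)) (input_string : String) (out : Bool) : Decidable (Spec_cyk_algorithm grammar input_string out) := by unfold Spec_cyk_algorithm; infer_instance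

-- ===== CLAIM (what is proved, stated in full; the proofs are below) =====
def Claim_equal_cyk_algorithm : Prop := ∀ (grammar : List (String × List String)) (input_string : String), Dom_cyk_algorithm grammar input_string → Pre_cyk_algorithm grammar input_string → Spec_cyk_algorithm grammar input_string (cyk_algorithm grammar input_string)

-- ===== LEMMAS AND PROOFS =====

-- proof-only helpers: the indexed BOTTOM-UP table, the bridge between A's table and B's recursion
def pvPhase1B (unit : PySem.Dict Char (PySem.Set String)) (cs : List Char) : Nat → Nat → PySem.Set String :=
  (List.range cs.length).foldl
    (fun t i => fun a b => if a = i ∧ b = i then PySem.Set.ofList (unit.getD (cs.getD i ' ') []) else t a b)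
    (fun _ _ => PySem.Set.empty)

def pvPhase2B (pairs : PySem.Dict (String × String) (PySem.Set String)) (n : Nat) (t1 : Nat → Nat → PySem.Set String) : Nat → Nat → PySem.Set String :=
  (List.range' 2 (n - 1)).foldl
    (fun t length =>
      (List.range (n - length + 1)).foldl
        (fun t i =>
          let j := i + length - 1
          let cell := (List.range' i (length - 1)).foldl
              (fun cell k => pvBStep pairs (t i k) (t (k + 1) j) cell) (t i j)
          fun a b => if a = i ∧ b = j then cell else t a b)
        t)
    t1

-- membership delta of A's unit pass over one rhs list
theorem mem_pvADiagP (lhs : String) (ch : Char) (ps : List String) (cell : PySem.Set String) (x : String) :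
    x ∈ pvADiagP lhs ch ps cell ↔ x ∈ cell ∨ ((∃ p ∈ ps, p.toList = [ch]) ∧ x = lhs) := by
  induction ps generalizing cell with
  | nil => simp [pvADiagP]
  | cons p ps ih =>
    simp only [pvADiagP, List.foldl_cons] at *
    rw [ih]
    have step : ∀ y : String,
        (y ∈ ((match p.toList with
                | [b] => if b = ch then PySem.Set.add cell lhs else cell
                | _ => cell) : PySem.Set String)) ↔
          y ∈ cell ∨ (p.toList = [ch] ∧ y = lhs) := by
      intro y
      rcases hp : p.toList with _ | ⟨b, t⟩
      · show y ∈ cell ↔ _; simp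
      · rcases t with _ | ⟨c, t⟩
        · show (y ∈ if b = ch then PySem.Set.add cell lhs else cell) ↔ _
          by_cases hb : b = ch
          · subst hb
            rw [if_pos rfl, PySem.Set.mem_add]
            simp
          · rw [if_neg hb]
            simp [hb]
        · show y ∈ cell ↔ _; simp
    rw [step]
    simp only [List.mem_cons]
    constructor
    · rintro ((h | h) | ⟨⟨q, hq, hq2⟩, rfl⟩)
      exacts [Or.inl h, Or.inr ⟨⟨p, Or.inl rfl, h.1⟩, h.2⟩, Or.inr ⟨⟨q, Or.inr hq, hq2⟩, rfl⟩]
    · rintro (h | ⟨⟨q, (rfl | hq), hq2⟩, rfl⟩)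
      exacts [Or.inl (Or.inl h), Or.inl (Or.inr ⟨hq2, rfl⟩), Or.inr ⟨⟨q, hq, hq2⟩, rfl⟩]

theorem mem_pvADiag (g : List (String × List String)) (ch : Char) (cell : PySem.Set String) (x : String) :
    x ∈ pvADiag g ch cell ↔ x ∈ cell ∨ ∃ lv ∈ g, (∃ p ∈ lv.2, p.toList = [ch]) ∧ x = lv.1 := by
  induction g generalizing cell with
  | nil => simp [pvADiag]
  | cons lv g ih =>
    simp only [pvADiag, List.foldl_cons] at *
    rw [ih, mem_pvADiagP]
    simp only [List.mem_cons]
    constructor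
    · rintro ((h | h) | ⟨lv', hlv', h2⟩)
      exacts [Or.inl h, Or.inr ⟨lv, Or.inl rfl, h⟩, Or.inr ⟨lv', Or.inr hlv', h2⟩]
    · rintro (h | ⟨lv', (rfl | hlv'), h2⟩)
      exacts [Or.inl (Or.inl h), Or.inl (Or.inr h2), Or.inr ⟨lv', hlv', h2⟩]

-- membership delta of B's unit-index pass over one rhs list
theorem mem_pvBUnitP (lhs : String) (ps : List String) (d : PySem.Dict Char (PySem.Set String)) (ch : Char) (x : String) :
    x ∈ (pvBUnitP lhs ps d).getD ch [] ↔ x ∈ d.getD ch [] ∨ ((∃ p ∈ ps, p.toList = [ch]) ∧ x = lhs) := by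
  induction ps generalizing d with
  | nil => simp [pvBUnitP]
  | cons p ps ih =>
    simp only [pvBUnitP, List.foldl_cons] at *
    rw [ih]
    have step : ∀ y : String,
        (y ∈ ((match p.toList with
                | [b] => d.modify b [] (fun s => PySem.Set.add s lhs)
                | _ => d) : PySem.Dict Char (PySem.Set String)).getD ch []) ↔
          y ∈ d.getD ch [] ∨ (p.toList = [ch] ∧ y = lhs) := by
      intro y
      rcases hp : p.toList with _ | ⟨b, t⟩
      · simp
      · rcases t with _ | ⟨c, t⟩
        · show y ∈ (d.modify b [] (fun s => PySem.Set.add s lhs)).getD ch [] ↔ _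
          rw [PySem.Dict.getD_modify]
          by_cases hb : ch = b
          · subst hb
            rw [if_pos rfl, PySem.Set.mem_add]
            constructor
            · rintro (h | rfl)
              exacts [Or.inl h, Or.inr ⟨rfl, rfl⟩]
            · rintro (h | ⟨-, rfl⟩)
              exacts [Or.inl h, Or.inr rfl]
          · rw [if_neg hb]
            constructor
            · exact Or.inl
            · rintro (h | ⟨h1, rfl⟩)
              · exact h
              · cases h1; exact absurd rfl hb
        · simp
    rw [step]
    simp only [List.mem_cons]
    constructor
    · rintro ((h | h) | ⟨⟨q, hq, hq2⟩, rfl⟩)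
      exacts [Or.inl h, Or.inr ⟨⟨p, Or.inl rfl, h.1⟩, h.2⟩, Or.inr ⟨⟨q, Or.inr hq, hq2⟩, rfl⟩]
    · rintro (h | ⟨⟨q, (rfl | hq), hq2⟩, rfl⟩)
      exacts [Or.inl (Or.inl h), Or.inl (Or.inr ⟨hq2, rfl⟩), Or.inr ⟨⟨q, hq, hq2⟩, rfl⟩]

theorem mem_pvBuildUnit (g : List (String × List String)) (ch : Char) (x : String) :
    x ∈ (pvBuildUnit g).getD ch [] ↔ ∃ lv ∈ g, (∃ p ∈ lv.2, p.toList = [ch]) ∧ x = lv.1 := by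
  suffices h : ∀ d, x ∈ (g.foldl (fun d lv => pvBUnitP lv.1 lv.2 d) d).getD ch [] ↔
      x ∈ d.getD ch [] ∨ ∃ lv ∈ g, (∃ p ∈ lv.2, p.toList = [ch]) ∧ x = lv.1 by
    rw [pvBuildUnit, h]; simp [PySem.Dict.getD_empty]
  intro d
  induction g generalizing d with
  | nil => simp
  | cons lv g ih =>
    simp only [List.foldl_cons]
    rw [ih, mem_pvBUnitP]
    simp only [List.mem_cons]
    constructor
    · rintro ((h | h) | ⟨lv', hlv', h2⟩)
      exacts [Or.inl h, Or.inr ⟨lv, Or.inl rfl, h⟩, Or.inr ⟨lv', Or.inr hlv', h2⟩]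
    · rintro (h | ⟨lv', (rfl | hlv'), h2⟩)
      exacts [Or.inl (Or.inl h), Or.inl (Or.inr h2), Or.inr ⟨lv', hlv', h2⟩]

-- membership delta of A's pair scan over one rhs list
theorem mem_pvAStepP (lhs : String) (u v : PySem.Set String) (ps : List String) (cell : PySem.Set String) (x : String) :
    x ∈ pvAStepP lhs u v ps cell ↔ x ∈ cell ∨
      ((∃ p ∈ ps, ∃ b c, p.toList = [b, c] ∧ pvSing b ∈ u ∧ pvSing c ∈ v) ∧ x = lhs) := by
  induction ps generalizing cell with
  | nil => simp [pvAStepP]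
  | cons p ps ih =>
    simp only [pvAStepP, List.foldl_cons] at *
    rw [ih]
    have step : ∀ y : String,
        (y ∈ ((match p.toList with
                | [b, c] => if PySem.Set.contains u (pvSing b) && PySem.Set.contains v (pvSing c)
                            then PySem.Set.add cell lhs else cell
                | _ => cell) : PySem.Set String)) ↔
          y ∈ cell ∨ ((∃ b c, p.toList = [b, c] ∧ pvSing b ∈ u ∧ pvSing c ∈ v) ∧ y = lhs) := by
      intro y
      rcases hp : p.toList with _ | ⟨b, t⟩
      · simp
      · rcases t with _ | ⟨c, t⟩
        · simp
        · rcases t with _ | ⟨e, t⟩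
          · show (y ∈ if PySem.Set.contains u (pvSing b) && PySem.Set.contains v (pvSing c)
                      then PySem.Set.add cell lhs else cell) ↔ _
            by_cases hbc : (PySem.Set.contains u (pvSing b) && PySem.Set.contains v (pvSing c)) = true
            · rw [if_pos hbc, PySem.Set.mem_add]
              simp only [Bool.and_eq_true] at hbc
              have hbu := (PySem.Set.contains_iff u (pvSing b)).1 hbc.1
              have hcv := (PySem.Set.contains_iff v (pvSing c)).1 hbc.2
              constructor
              · rintro (h | rfl)
                exacts [Or.inl h, Or.inr ⟨⟨b, c, rfl, hbu, hcv⟩, rfl⟩]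
              · rintro (h | ⟨_, rfl⟩)
                exacts [Or.inl h, Or.inr rfl]
            · rw [if_neg hbc]
              constructor
              · exact Or.inl
              · rintro (h | ⟨⟨b', c', hq2, hb', hc'⟩, rfl⟩)
                · exact h
                · cases hq2
                  refine absurd ?_ hbc
                  simp only [Bool.and_eq_true]
                  exact ⟨(PySem.Set.contains_iff u _).2 hb', (PySem.Set.contains_iff v _).2 hc'⟩
          · simp
    rw [step]
    simp only [List.mem_cons]
    constructor
    · rintro ((h | h) | ⟨⟨q, hq, hq2⟩, rfl⟩)
      exacts [Or.inl h, Or.inr ⟨⟨p, Or.inl rfl, h.1.choose, h.1.choose_spec.choose, h.1.choose_spec.choose_spec⟩, h.2⟩,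
        Or.inr ⟨⟨q, Or.inr hq, hq2⟩, rfl⟩]
    · rintro (h | ⟨⟨q, (rfl | hq), hq2⟩, rfl⟩)
      exacts [Or.inl (Or.inl h), Or.inl (Or.inr ⟨hq2, rfl⟩), Or.inr ⟨⟨q, hq, hq2⟩, rfl⟩]

theorem mem_pvAStep (g : List (String × List String)) (u v : PySem.Set String) (cell : PySem.Set String) (x : String) :
    x ∈ pvAStep g u v cell ↔ x ∈ cell ∨
      ∃ lv ∈ g, (∃ p ∈ lv.2, ∃ b c, p.toList = [b, c] ∧ pvSing b ∈ u ∧ pvSing c ∈ v) ∧ x = lv.1 := by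
  induction g generalizing cell with
  | nil => simp [pvAStep]
  | cons lv g ih =>
    simp only [pvAStep, List.foldl_cons] at *
    rw [ih, mem_pvAStepP]
    simp only [List.mem_cons]
    constructor
    · rintro ((h | h) | ⟨lv', hlv', h2⟩)
      exacts [Or.inl h, Or.inr ⟨lv, Or.inl rfl, h⟩, Or.inr ⟨lv', Or.inr hlv', h2⟩]
    · rintro (h | ⟨lv', (rfl | hlv'), h2⟩)
      exacts [Or.inl (Or.inl h), Or.inl (Or.inr h2), Or.inr ⟨lv', hlv', h2⟩]

-- membership delta of B's pair-index pass over one rhs list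
theorem mem_pvBPairP (lhs : String) (ps : List String) (d : PySem.Dict (String × String) (PySem.Set String)) (K : String × String) (x : String) :
    x ∈ (pvBPairP lhs ps d).getD K [] ↔ x ∈ d.getD K [] ∨
      ((∃ p ∈ ps, ∃ b c, p.toList = [b, c] ∧ (pvSing b, pvSing c) = K) ∧ x = lhs) := by
  induction ps generalizing d with
  | nil => simp [pvBPairP]
  | cons p ps ih =>
    simp only [pvBPairP, List.foldl_cons] at *
    rw [ih]
    have step : ∀ y : String,
        (y ∈ ((match p.toList with
                | [b, c] => d.modify (pvSing b, pvSing c) [] (fun s => PySem.Set.add s lhs)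
                | _ => d) : PySem.Dict (String × String) (PySem.Set String)).getD K []) ↔
          y ∈ d.getD K [] ∨ ((∃ b c, p.toList = [b, c] ∧ (pvSing b, pvSing c) = K) ∧ y = lhs) := by
      intro y
      rcases hp : p.toList with _ | ⟨b, t⟩
      · simp
      · rcases t with _ | ⟨c, t⟩
        · simp
        · rcases t with _ | ⟨e, t⟩
          · show y ∈ (d.modify (pvSing b, pvSing c) [] (fun s => PySem.Set.add s lhs)).getD K [] ↔ _
            rw [PySem.Dict.getD_modify]
            by_cases hk : K = (pvSing b, pvSing c)
            · rw [if_pos hk, PySem.Set.mem_add]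
              constructor
              · rintro (h | rfl)
                · exact Or.inl (hk ▸ h)
                · exact Or.inr ⟨⟨b, c, rfl, hk.symm⟩, rfl⟩
              · rintro (h | ⟨_, rfl⟩)
                · exact Or.inl (hk ▸ h)
                · exact Or.inr rfl
            · rw [if_neg hk]
              constructor
              · exact Or.inl
              · rintro (h | ⟨⟨b', c', hq2, hk'⟩, rfl⟩)
                · exact h
                · cases hq2
                  exact absurd hk'.symm hk
          · simp
    rw [step]
    simp only [List.mem_cons]
    constructor
    · rintro ((h | h) | ⟨⟨q, hq, hq2⟩, rfl⟩)
      exacts [Or.inl h, Or.inr ⟨⟨p, Or.inl rfl, h.1.choose, h.1.choose_spec.choose, h.1.choose_spec.choose_spec⟩, h.2⟩,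
        Or.inr ⟨⟨q, Or.inr hq, hq2⟩, rfl⟩]
    · rintro (h | ⟨⟨q, (rfl | hq), hq2⟩, rfl⟩)
      exacts [Or.inl (Or.inl h), Or.inl (Or.inr ⟨hq2, rfl⟩), Or.inr ⟨⟨q, hq, hq2⟩, rfl⟩]

theorem mem_pvBuildPairs (g : List (String × List String)) (K : String × String) (x : String) :
    x ∈ (pvBuildPairs g).getD K [] ↔
      ∃ lv ∈ g, (∃ p ∈ lv.2, ∃ b c, p.toList = [b, c] ∧ (pvSing b, pvSing c) = K) ∧ x = lv.1 := by
  suffices h : ∀ d, x ∈ (g.foldl (fun d lv => pvBPairP lv.1 lv.2 d) d).getD K [] ↔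
      x ∈ d.getD K [] ∨ ∃ lv ∈ g, (∃ p ∈ lv.2, ∃ b c, p.toList = [b, c] ∧ (pvSing b, pvSing c) = K) ∧ x = lv.1 by
    rw [pvBuildPairs, h]; simp [PySem.Dict.getD_empty]
  intro d
  induction g generalizing d with
  | nil => simp
  | cons lv g ih =>
    simp only [List.foldl_cons]
    rw [ih, mem_pvBPairP]
    simp only [List.mem_cons]
    constructor
    · rintro ((h | h) | ⟨lv', hlv', h2⟩)
      exacts [Or.inl h, Or.inr ⟨lv, Or.inl rfl, h⟩, Or.inr ⟨lv', Or.inr hlv', h2⟩]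
    · rintro (h | ⟨lv', (rfl | hlv'), h2⟩)
      exacts [Or.inl (Or.inl h), Or.inl (Or.inr h2), Or.inr ⟨lv', hlv', h2⟩]

-- membership of B's double set-product loop
theorem mem_pvBStep (pairs : PySem.Dict (String × String) (PySem.Set String)) (u v cell : PySem.Set String) (x : String) :
    x ∈ pvBStep pairs u v cell ↔ x ∈ cell ∨ ∃ b ∈ u, ∃ c ∈ v, x ∈ pairs.getD (b, c) [] := by
  have inner : ∀ (b : String) (v : List String) (cell : PySem.Set String),
      x ∈ v.foldl (fun cell c => PySem.Set.union cell (pairs.getD (b, c) [])) cell ↔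
        x ∈ cell ∨ ∃ c ∈ v, x ∈ pairs.getD (b, c) [] := by
    intro b v
    induction v with
    | nil => simp
    | cons c v ih =>
      intro cell
      simp only [List.foldl_cons]
      rw [ih, PySem.Set.mem_union]
      simp only [List.mem_cons]
      constructor
      · rintro ((h | h) | ⟨c', hc', h2⟩)
        exacts [Or.inl h, Or.inr ⟨c, Or.inl rfl, h⟩, Or.inr ⟨c', Or.inr hc', h2⟩]
      · rintro (h | ⟨c', (rfl | hc'), h2⟩)
        exacts [Or.inl (Or.inl h), Or.inl (Or.inr h2), Or.inr ⟨c', hc', h2⟩]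
  induction u generalizing cell with
  | nil => simp [pvBStep]
  | cons b u ih =>
    simp only [pvBStep, List.foldl_cons] at *
    simp only [ih, inner, List.mem_cons]
    constructor
    · rintro ((h | ⟨c', hc', h2⟩) | ⟨b', hb', h2⟩)
      exacts [Or.inl h, Or.inr ⟨b, Or.inl rfl, c', hc', h2⟩, Or.inr ⟨b', Or.inr hb', h2⟩]
    · rintro (h | ⟨b', (rfl | hb'), h2⟩)
      exacts [Or.inl (Or.inl h), Or.inl (Or.inr h2), Or.inr ⟨b', hb', h2⟩]

-- pvBStep is a congruence in the memberships of its three set arguments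
theorem pvBStep_congr (pairs : PySem.Dict (String × String) (PySem.Set String)) (u u' v v' c c' : PySem.Set String)
    (hu : ∀ x, x ∈ u ↔ x ∈ u') (hv : ∀ x, x ∈ v ↔ x ∈ v') (hc : ∀ x, x ∈ c ↔ x ∈ c') (x : String) :
    x ∈ pvBStep pairs u v c ↔ x ∈ pvBStep pairs u' v' c' := by
  rw [mem_pvBStep, mem_pvBStep, hc]
  apply or_congr Iff.rfl
  constructor
  · rintro ⟨b, hb, d, hd, h⟩; exact ⟨b, (hu b).1 hb, d, (hv d).1 hd, h⟩
  · rintro ⟨b, hb, d, hd, h⟩; exact ⟨b, (hu b).2 hb, d, (hv d).2 hd, h⟩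

-- one (i,j,k) step: A's grammar scan and B's indexed product add the same elements
theorem step_equiv (g : List (String × List String)) (u u' v v' cell cell' : PySem.Set String)
    (hu : ∀ x, x ∈ u ↔ x ∈ u') (hv : ∀ x, x ∈ v ↔ x ∈ v') (hc : ∀ x, x ∈ cell ↔ x ∈ cell') (x : String) :
    x ∈ pvAStep g u v cell ↔ x ∈ pvBStep (pvBuildPairs g) u' v' cell' := by
  rw [mem_pvAStep, mem_pvBStep, hc]
  apply or_congr Iff.rfl
  constructor
  · rintro ⟨lv, hlv, ⟨p, hp, b, c, hbc, hbu, hcv⟩, hx⟩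
    exact ⟨pvSing b, (hu _).1 hbu, pvSing c, (hv _).1 hcv,
      (mem_pvBuildPairs g _ x).2 ⟨lv, hlv, ⟨p, hp, b, c, hbc, rfl⟩, hx⟩⟩
  · rintro ⟨b', hb', c', hc', hmem⟩
    rcases (mem_pvBuildPairs g _ x).1 hmem with ⟨lv, hlv, ⟨p, hp, b, c, hbc, hk⟩, hx⟩
    cases hk
    exact ⟨lv, hlv, ⟨p, hp, b, c, hbc, (hu _).2 hb', (hv _).2 hc'⟩, hx⟩

-- table relation: same membership in every cell
def pvRel (t t' : Nat → Nat → PySem.Set String) : Prop := ∀ a b x, x ∈ t a b ↔ x ∈ t' a b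

theorem foldl_rel {α : Type} (F G : (Nat → Nat → PySem.Set String) → α → (Nat → Nat → PySem.Set String))
    (l : List α) (t t' : Nat → Nat → PySem.Set String)
    (h : ∀ t t' x, x ∈ l → pvRel t t' → pvRel (F t x) (G t' x)) (ht : pvRel t t') :
    pvRel (l.foldl F t) (l.foldl G t') := by
  induction l generalizing t t' with
  | nil => exact ht
  | cons a l ih =>
    exact ih _ _ (fun t t' x hx => h t t' x (List.mem_cons_of_mem a hx)) (h t t' a List.mem_cons_self ht)

theorem phase1_rel (g : List (String × List String)) (cs : List Char) :
    pvRel (pvPhase1A g cs) (pvPhase1B (pvBuildUnit g) cs) := by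
  unfold pvPhase1A pvPhase1B
  suffices h : ∀ (l : List Nat) (t t' : Nat → Nat → PySem.Set String), l.Nodup →
      (∀ i ∈ l, t i i = PySem.Set.empty) → pvRel t t' →
      pvRel (l.foldl (fun t i => fun a b => if a = i ∧ b = i then pvADiag g (cs.getD i ' ') (t i i) else t a b) t)
            (l.foldl (fun t i => fun a b => if a = i ∧ b = i then PySem.Set.ofList ((pvBuildUnit g).getD (cs.getD i ' ') []) else t a b) t') by
    exact h _ _ _ List.nodup_range (fun _ _ => rfl) (fun _ _ _ => Iff.rfl)
  intro l
  induction l with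
  | nil => intro t t' _ _ ht; exact ht
  | cons i l ih =>
    intro t t' hnd hemp ht
    simp only [List.foldl_cons]
    refine ih _ _ (List.nodup_cons.1 hnd).2 ?_ ?_
    · intro i' hi'
      have hne : i' ≠ i := fun h => (List.nodup_cons.1 hnd).1 (h ▸ hi')
      simp only [if_neg (by tauto : ¬ (i' = i ∧ i' = i))]
      exact hemp i' (List.mem_cons_of_mem _ hi')
    · intro a b x
      by_cases hab : a = i ∧ b = i
      · simp only [if_pos hab]
        rw [hemp i List.mem_cons_self, mem_pvADiag, PySem.Set.mem_ofList, mem_pvBuildUnit]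
        simp [PySem.Set.empty]
      · simp only [if_neg hab]; exact ht a b x

theorem phase2_rel (g : List (String × List String)) (n : Nat) (t1 t1' : Nat → Nat → PySem.Set String)
    (h1 : pvRel t1 t1') : pvRel (pvPhase2A g n t1) (pvPhase2B (pvBuildPairs g) n t1') := by
  unfold pvPhase2A pvPhase2B
  refine foldl_rel _ _ _ _ _ (fun t t' length _ ht => ?_) h1
  refine foldl_rel _ _ _ _ _ (fun t t' i _ ht => ?_) ht
  intro a b x
  by_cases hab : a = i ∧ b = i + length - 1
  · simp only [if_pos hab]
    suffices hcell : ∀ (ks : List Nat) (c c' : PySem.Set String), (∀ y, y ∈ c ↔ y ∈ c') → ∀ y,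
        y ∈ ks.foldl (fun cell k => pvAStep g (t i k) (t (k + 1) (i + length - 1)) cell) c ↔
        y ∈ ks.foldl (fun cell k => pvBStep (pvBuildPairs g) (t' i k) (t' (k + 1) (i + length - 1)) cell) c' by
      exact hcell _ _ _ (fun y => ht i (i + length - 1) y) x
    intro ks
    induction ks with
    | nil => intro c c' hc y; exact hc y
    | cons k ks ih =>
      intro c c' hc y
      simp only [List.foldl_cons]
      exact ih _ _ (fun z => step_equiv g _ _ _ _ _ _ (fun w => ht i k w) (fun w => ht (k + 1) _ w) hc z) y
  · simp only [if_neg hab]; exact ht a b x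

-- enough fuel: pvSolve's value does not depend on the fuel once it exceeds the span
theorem pvSolve_fuel_congr (unit : PySem.Dict Char (PySem.Set String)) (pairs : PySem.Dict (String × String) (PySem.Set String))
    (cs : List Char) : ∀ (f f' i j : Nat), j - i < f → j - i < f' →
    pvSolve unit pairs cs f i j = pvSolve unit pairs cs f' i j := by
  intro f
  induction f with
  | zero => intro f' i j h; omega
  | succ f ih =>
    intro f' i j hf hf'
    cases f' with
    | zero => omega
    | succ f' =>
      conv_lhs => rw [pvSolve]
      conv_rhs => rw [pvSolve]
      by_cases hij : i = j
      · rw [if_pos hij, if_pos hij]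
      · rw [if_neg hij, if_neg hij]
        refine PySem.List.foldl_congr_mem _ _ _ _ (fun cell k hk => ?_)
        rcases List.mem_range'_1.mp hk with ⟨h1, h2⟩
        rw [ih f' i k (by omega) (by omega), ih f' (k + 1) j (by omega) (by omega)]

-- unfolding pvSolve at the SAME (sufficient) fuel in the recursive calls
theorem mem_pvSolve_ne (unit : PySem.Dict Char (PySem.Set String)) (pairs : PySem.Dict (String × String) (PySem.Set String))
    (cs : List Char) (F i j : Nat) (hij : i ≠ j) (hF : j - i < F) (x : String) :
    x ∈ pvSolve unit pairs cs F i j ↔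
      x ∈ (List.range' i (j - i)).foldl
        (fun cell k => pvBStep pairs (pvSolve unit pairs cs F i k) (pvSolve unit pairs cs F (k + 1) j) cell)
        PySem.Set.empty := by
  cases F with
  | zero => omega
  | succ f =>
    conv_lhs => rw [pvSolve]
    rw [if_neg hij]
    rw [PySem.List.foldl_congr_mem _ _
      (fun cell k => pvBStep pairs (pvSolve unit pairs cs (f + 1) i k) (pvSolve unit pairs cs (f + 1) (k + 1) j) cell)
      _ (fun cell k hk => ?_)]
    rcases List.mem_range'_1.mp hk with ⟨h1, h2⟩
    rw [pvSolve_fuel_congr unit pairs cs f (f + 1) i k (by omega) (by omega),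
        pvSolve_fuel_congr unit pairs cs f (f + 1) (k + 1) j (by omega) (by omega)]

-- the initial table: only the diagonal below cs.length is filled
theorem mem_pvPhase1B (unit : PySem.Dict Char (PySem.Set String)) (cs : List Char) (a b : Nat) (x : String) :
    x ∈ pvPhase1B unit cs a b ↔
      (a = b ∧ a < cs.length ∧ x ∈ PySem.Set.ofList (unit.getD (cs.getD a ' ') [])) := by
  unfold pvPhase1B
  suffices h : ∀ (l : List Nat) (t : Nat → Nat → PySem.Set String),
      (x ∈ (l.foldl (fun t i => fun a b => if a = i ∧ b = i then PySem.Set.ofList (unit.getD (cs.getD i ' ') []) else t a b) t) a b ↔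
        ((a = b ∧ a ∈ l ∧ x ∈ PySem.Set.ofList (unit.getD (cs.getD a ' ') [])) ∨ (¬ (a = b ∧ a ∈ l) ∧ x ∈ t a b))) by
    rw [h]
    constructor
    · rintro (⟨h1, h2, h3⟩ | ⟨_, h2⟩)
      · exact ⟨h1, List.mem_range.mp h2, h3⟩
      · exact absurd h2 (by simp [PySem.Set.empty])
    · rintro ⟨h1, h2, h3⟩
      exact Or.inl ⟨h1, List.mem_range.mpr h2, h3⟩
  intro l
  induction l with
  | nil => intro t; simp
  | cons i l ih =>
    intro t
    simp only [List.foldl_cons]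
    rw [ih]
    simp only [List.mem_cons]
    by_cases hab : a = b
    · subst hab
      by_cases hai : a = i
      · subst hai
        by_cases hal : a ∈ l
        · simp [hal]
        · simp [hal]
      · by_cases hal : a ∈ l
        · simp [hal, hai]
        · simp [hal, hai]
    · have hne : ¬ (a = i ∧ b = i) := by rintro ⟨rfl, rfl⟩; exact hab rfl
      simp [hab, hne]

-- the i-loop of one bottom-up length pass writes exactly solve's value into each span-(L+1) cell
theorem inner_fold_char (unit : PySem.Dict Char (PySem.Set String)) (pairs : PySem.Dict (String × String) (PySem.Set String))
    (cs : List Char) (n L F : Nat) (hL : 1 ≤ L) (hF : n ≤ F) :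
    ∀ (is : List Nat) (t : Nat → Nat → PySem.Set String), is.Nodup → (∀ i ∈ is, i + L < n) →
    (∀ a b, a ≤ b → b < n → b + 1 ≤ a + L → ∀ x, x ∈ t a b ↔ x ∈ pvSolve unit pairs cs F a b) →
    (∀ a b, a < b → b < n → (a + L < b ∨ (b = a + L ∧ a ∈ is)) → ∀ x, x ∉ t a b) →
    ∀ a b x,
      x ∈ (is.foldl (fun t i =>
            let cell := (List.range' i L).foldl
                (fun cell k => pvBStep pairs (t i k) (t (k + 1) (i + L)) cell) (t i (i + L))
            fun a b => if a = i ∧ b = i + L then cell else t a b) t) a b ↔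
        (if b = a + L ∧ a ∈ is then x ∈ pvSolve unit pairs cs F a b else x ∈ t a b) := by
  intro is
  induction is with
  | nil => intro t _ _ _ _ a b x; simp
  | cons i is ih =>
    intro t hnd hin h1 h2 a b x
    simp only [List.foldl_cons]
    have hiL : i + L < n := hin i List.mem_cons_self
    -- the freshly written cell equals solve i (i+L)
    have hcell : ∀ y, y ∈ (List.range' i L).foldl
        (fun cell k => pvBStep pairs (t i k) (t (k + 1) (i + L)) cell) (t i (i + L)) ↔
        y ∈ pvSolve unit pairs cs F i (i + L) := by
      intro y
      rw [mem_pvSolve_ne unit pairs cs F i (i + L) (by omega) (by omega)]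
      have : i + L - i = L := by omega
      rw [this]
      -- congruence of the k-fold
      suffices hgen : ∀ (ks : List Nat), (∀ k ∈ ks, i ≤ k ∧ k < i + L) →
          ∀ (c c' : PySem.Set String), (∀ z, z ∈ c ↔ z ∈ c') → ∀ z,
          z ∈ ks.foldl (fun cell k => pvBStep pairs (t i k) (t (k + 1) (i + L)) cell) c ↔
          z ∈ ks.foldl (fun cell k => pvBStep pairs (pvSolve unit pairs cs F i k) (pvSolve unit pairs cs F (k + 1) (i + L)) cell) c' by
        refine hgen _ (fun k hk => ?_) _ _ (fun z => ?_) y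
        · rcases List.mem_range'_1.mp hk with ⟨u1, u2⟩; omega
        · constructor
          · intro hz
            exact absurd hz (h2 i (i + L) (by omega) hiL (Or.inr ⟨rfl, List.mem_cons_self⟩) z)
          · intro hz; exact absurd hz (by simp [PySem.Set.empty])
      intro ks
      induction ks with
      | nil => intro _ c c' hc z; exact hc z
      | cons k ks ihk =>
        intro hks c c' hc z
        simp only [List.foldl_cons]
        refine ihk (fun q hq => hks q (List.mem_cons_of_mem _ hq)) _ _ (fun w => ?_) z
        have hk := hks k List.mem_cons_self
        exact pvBStep_congr pairs _ _ _ _ _ _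
          (fun w => h1 i k hk.1 (by omega) (by omega) w)
          (fun w => h1 (k + 1) (i + L) (by omega) hiL (by omega) w)
          hc w
    -- apply the IH to the updated table
    rw [ih _ (List.nodup_cons.1 hnd).2 (fun q hq => hin q (List.mem_cons_of_mem _ hq))
        (fun a b hab hbn hspan y => ?_) (fun a b hab hbn hcond y => ?_)]
    · by_cases hmem : b = a + L ∧ a ∈ is
      · rw [if_pos hmem, if_pos ⟨hmem.1, List.mem_cons_of_mem _ hmem.2⟩]
      · rw [if_neg hmem]
        by_cases hwr : a = i ∧ b = i + L
        · rcases hwr with ⟨rfl, rfl⟩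
          rw [if_pos ⟨rfl, rfl⟩, if_pos ⟨rfl, List.mem_cons_self⟩]
          exact hcell x
        · rw [if_neg hwr]
          by_cases hall : b = a + L ∧ a ∈ i :: is
          · rcases hall with ⟨rfl, hmem2⟩
            rcases List.mem_cons.mp hmem2 with rfl | hmem3
            · exact absurd ⟨rfl, rfl⟩ hwr
            · exact absurd ⟨rfl, hmem3⟩ hmem
          · rw [if_neg hall]
    · -- h1 is preserved: the write is at span L+1 > L
      have hwr : ¬ (a = i ∧ b = i + L) := by rintro ⟨rfl, rfl⟩; omega
      rw [if_neg hwr]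
      exact h1 a b hab hbn hspan y
    · -- h2 for the tail: the write only fills (i, i+L)
      have hwr : ¬ (a = i ∧ b = i + L) := by
        rintro ⟨rfl, rfl⟩
        rcases hcond with h | ⟨_, hmem⟩
        · omega
        · exact (List.nodup_cons.1 hnd).1 hmem
      rw [if_neg hwr]
      refine h2 a b hab hbn ?_ y
      rcases hcond with h | ⟨hb, hmem⟩
      · exact Or.inl h
      · exact Or.inr ⟨hb, List.mem_cons_of_mem _ hmem⟩

-- the lengths loop: after processing lengths up to L, every cell of span ≤ L holds solve's value
theorem lengths_fold_char (unit : PySem.Dict Char (PySem.Set String)) (pairs : PySem.Dict (String × String) (PySem.Set String))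
    (cs : List Char) (n F : Nat) (hF : n ≤ F) :
    ∀ (c L : Nat) (t : Nat → Nat → PySem.Set String), 1 ≤ L → L + c ≤ n →
    (∀ a b, a ≤ b → b < n → b + 1 ≤ a + L → ∀ x, x ∈ t a b ↔ x ∈ pvSolve unit pairs cs F a b) →
    (∀ a b, a < b → b < n → a + L ≤ b → ∀ x, x ∉ t a b) →
    (∀ a b, a ≤ b → b < n → b + 1 ≤ a + (L + c) → ∀ x,
      x ∈ ((List.range' (L + 1) c).foldl
        (fun t length =>
          (List.range (n - length + 1)).foldl
            (fun t i =>
              let j := i + length - 1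
              let cell := (List.range' i (length - 1)).foldl
                  (fun cell k => pvBStep pairs (t i k) (t (k + 1) j) cell) (t i j)
              fun a b => if a = i ∧ b = j then cell else t a b)
            t)
        t) a b ↔ x ∈ pvSolve unit pairs cs F a b) := by
  intro c
  induction c with
  | zero => intro L t hL _ h1 _ a b hab hbn hspan x; exact h1 a b hab hbn (by omega) x
  | succ c ih =>
    intro L t hL hLc h1 h2
    have hstep := inner_fold_char unit pairs cs n L F hL hF (List.range (n - (L + 1) + 1)) t
      List.nodup_range
      (fun i hi => by
        have := List.mem_range.mp hi
        omega)
      h1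
      (fun a b hab hbn hcond => by
        refine h2 a b hab hbn ?_
        rcases hcond with h | ⟨hb, _⟩ <;> omega)
    -- the table after the (L+1)-length pass, rewritten: i + (L+1) - 1 = i + L, (L+1) - 1 = L
    rw [List.range'_succ]
    simp only [List.foldl_cons]
    have hsimp : (List.range (n - (L + 1) + 1)).foldl
        (fun t i =>
          let j := i + (L + 1) - 1
          let cell := (List.range' i ((L + 1) - 1)).foldl
              (fun cell k => pvBStep pairs (t i k) (t (k + 1) j) cell) (t i j)
          fun a b => if a = i ∧ b = j then cell else t a b) t
      = (List.range (n - (L + 1) + 1)).foldl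
        (fun t i =>
          let cell := (List.range' i L).foldl
              (fun cell k => pvBStep pairs (t i k) (t (k + 1) (i + L)) cell) (t i (i + L))
          fun a b => if a = i ∧ b = i + L then cell else t a b) t := by
      refine PySem.List.foldl_congr_mem _ _ _ _ (fun t' i _ => ?_)
      have e1 : i + (L + 1) - 1 = i + L := by omega
      have e2 : (L + 1) - 1 = L := by omega
      rw [e1, e2]
    rw [hsimp]
    intro a b hab hbn hspan x
    refine ih (L + 1) _ (by omega) (by omega) ?_ ?_ a b hab hbn (by omega) x
    · -- h1 at L+1 from the inner-pass characterisation
      intro a b hab hbn hspan x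
      rw [hstep a b x]
      by_cases hb : b = a + L ∧ a ∈ List.range (n - (L + 1) + 1)
      · rw [if_pos hb]
      · rw [if_neg hb]
        refine h1 a b hab hbn ?_ x
        by_cases hba : b = a + L
        · exfalso
          exact hb ⟨hba, List.mem_range.mpr (by omega)⟩
        · omega
    · -- h2 at L+1
      intro a b hab hbn hcond x
      rw [hstep a b x]
      have hb : ¬ (b = a + L ∧ a ∈ List.range (n - (L + 1) + 1)) := by
        rintro ⟨rfl, _⟩; omega
      rw [if_neg hb]
      exact h2 a b hab hbn (by omega) x

-- one unit of fuel computes the diagonal cell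
theorem pvSolve_diag (unit : PySem.Dict Char (PySem.Set String)) (pairs : PySem.Dict (String × String) (PySem.Set String))
    (cs : List Char) (F i : Nat) (hF : 1 ≤ F) :
    pvSolve unit pairs cs F i i = PySem.Set.ofList (unit.getD (cs.getD i ' ') []) := by
  cases F with
  | zero => omega
  | succ f => simp [pvSolve]

-- the full bottom-up indexed table agrees with top-down solve on every valid span
theorem phase2B_eq_solve (unit : PySem.Dict Char (PySem.Set String)) (pairs : PySem.Dict (String × String) (PySem.Set String))
    (cs : List Char) (i j : Nat) (hij : i ≤ j) (hj : j < cs.length) (x : String) :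
    x ∈ pvPhase2B pairs cs.length (pvPhase1B unit cs) i j ↔
      x ∈ pvSolve unit pairs cs cs.length i j := by
  unfold pvPhase2B
  have h := lengths_fold_char unit pairs cs cs.length cs.length (le_refl _) (cs.length - 1) 1
    (pvPhase1B unit cs) (le_refl _) (by omega)
    (fun a b hab hbn hspan x => by
      have hab2 : a = b := by omega
      subst hab2
      rw [mem_pvPhase1B, pvSolve_diag unit pairs cs cs.length a (by omega)]
      constructor
      · rintro ⟨_, _, h3⟩; exact h3
      · intro h3; exact ⟨rfl, hbn, h3⟩)
    (fun a b hab hbn hcond x hx => by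
      rcases (mem_pvPhase1B unit cs a b x).1 hx with ⟨rfl, _, _⟩
      omega)
    i j hij hj (by omega) x
  have e : (1 : Nat) + 1 = 2 := rfl
  rw [← e]
  -- both fuels: cs.length vs cs.length — already aligned
  exact h

-- ===== VERDICT (by name: the statement is the Claim_ definition above) =====
theorem cyk_algorithm_spec : Claim_equal_cyk_algorithm := by
  intro grammar input_string _ hpre
  unfold Spec_cyk_algorithm cyk_algorithm cyk_algorithm_alt
  have hne : input_string.toList ≠ [] := by
    intro h
    exact hpre (by simpa using congrArg String.ofList h)
  have hlen : 1 ≤ input_string.toList.length := by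
    cases h : input_string.toList with
    | nil => exact absurd h hne
    | cons a l => simp
  have hrel := phase2_rel ((PySem.Dict.ofList grammar).items) input_string.toList.length
    (pvPhase1A ((PySem.Dict.ofList grammar).items) input_string.toList)
    (pvPhase1B (pvBuildUnit ((PySem.Dict.ofList grammar).items)) input_string.toList)
    (phase1_rel _ _)
  have hsolve := fun x => phase2B_eq_solve (pvBuildUnit ((PySem.Dict.ofList grammar).items))
    (pvBuildPairs ((PySem.Dict.ofList grammar).items)) input_string.toList
    0 (input_string.toList.length - 1) (by omega) (by omega) x
  have hmem := fun x => (hrel 0 (input_string.toList.length - 1) x).trans (hsolve x)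
  simp only [PySem.Set.contains_eq_listContains]
  rw [Bool.eq_iff_iff]
  constructor
  · intro h
    exact List.contains_iff_mem.mpr ((hmem "S").1 (List.contains_iff_mem.mp h))
  · intro h
    exact List.contains_iff_mem.mpr ((hmem "S").2 (List.contains_iff_mem.mp h))
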